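-- pv_equiv track=rewrite | github.com/jphilli1/Repo-Github | Work/CR_Refactored/CR_PEERS_JP/case_shiller_zip_mapper.py | map_zip_to_metro
-- ===== SOURCE A (Python) =====
-- from typing import Any, Dict, List, Optional, Tuple
--
-- CASE_SHILLER_METROS = {
--     "Atlanta": {"prefix": ["300", "301", "302", "303"]},
--     "Boston": {"prefix": ["020", "021", "022", "023", "024"]},
--     "Charlotte": {"prefix": ["280", "281", "282"]},
--     "Chicago": {"prefix": ["600", "601", "602", "603", "604", "605", "606"]},
--     "Cleveland": {"prefix": ["440", "441", "442", "443", "444"]},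
--     "Dallas": {"prefix": ["750", "751", "752", "753", "754", "755"]},
--     "Denver": {"prefix": ["800", "801", "802", "803", "804"]},
--     "Detroit": {"prefix": ["480", "481", "482", "483", "484"]},
--     "Las Vegas": {"prefix": ["889", "890", "891"]},
--     "Los Angeles": {"prefix": ["900", "901", "902", "903", "904", "905", "906", "907", "908", "910", "911", "912", "913", "914", "915", "916", "917", "918"]},
--     "Miami": {"prefix": ["330", "331", "332", "333", "334"]},
--     "Minneapolis": {"prefix": ["550", "551", "553", "554", "555"]},
--     "New York": {"prefix": ["100", "101", "102", "103", "104", "105", "106", "107", "108", "109", "110", "111", "112", "113", "114", "115", "116", "117"]},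
--     "Phoenix": {"prefix": ["850", "851", "852", "853"]},
--     "Portland": {"prefix": ["970", "971", "972"]},
--     "San Diego": {"prefix": ["919", "920", "921"]},
--     "San Francisco": {"prefix": ["940", "941", "942", "943", "944", "945", "946", "947", "948", "949", "950", "951"]},
--     "Seattle": {"prefix": ["980", "981", "982", "983", "984"]},
--     "Tampa": {"prefix": ["335", "336", "337", "338"]},
--     "Washington": {"prefix": ["200", "201", "202", "203", "204", "205", "206", "207", "208", "209", "220", "221"]},
-- }
--
-- def map_zip_to_metro(zip_code: str) -> Optional[str]:
--     """Map a 5-character ZIP code to a Case-Shiller metro name, or None."""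
--     if not zip_code or len(str(zip_code)) < 3:
--         return None
--     prefix = str(zip_code).zfill(5)[:3]
--     for metro, info in CASE_SHILLER_METROS.items():
--         if prefix in info["prefix"]:
--             return metro
--     return None
-- ===== SOURCE B (Python) =====
-- from typing import Optional
--
-- # Contiguous numeric prefix ranges (lo, hi, metro), ascending; equivalent to the
-- # per-metro prefix lists because every prefix is a 3-digit string.
-- METRO_RANGES = [
--     (20, 24, "Boston"),
--     (100, 117, "New York"),
--     (200, 209, "Washington"),
--     (220, 221, "Washington"),
--     (280, 282, "Charlotte"),
--     (300, 303, "Atlanta"),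
--     (330, 334, "Miami"),
--     (335, 338, "Tampa"),
--     (440, 444, "Cleveland"),
--     (480, 484, "Detroit"),
--     (550, 551, "Minneapolis"),
--     (553, 555, "Minneapolis"),
--     (600, 606, "Chicago"),
--     (750, 755, "Dallas"),
--     (800, 804, "Denver"),
--     (850, 853, "Phoenix"),
--     (889, 891, "Las Vegas"),
--     (900, 908, "Los Angeles"),
--     (910, 918, "Los Angeles"),
--     (919, 921, "San Diego"),
--     (940, 951, "San Francisco"),
--     (970, 972, "Portland"),
--     (980, 984, "Seattle"),
-- ]
--
-- def map_zip_to_metro(zip_code: str) -> Optional[str]: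
--     if not zip_code or len(str(zip_code)) < 3:
--         return None
--     prefix = str(zip_code).zfill(5)[:3]
--     if not prefix.isdigit():
--         return None
--     n = int(prefix)
--     for lo, hi, metro in METRO_RANGES:
--         if lo <= n <= hi:
--             return metro
--     return None
-- ===== Notes on version B (the rewrite author's own statement) =====
-- stated objective: alternative
-- what changed: B validates the 3-char prefix with isdigit, converts it to an integer, and scans 23 contiguous (lo, hi, metro) numeric ranges instead of A's per-metro membership test against 130 prefix strings; correct because every table prefix is a 3-digit string and the ranges exactly cover the prefix lists.
import Mathlib
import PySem

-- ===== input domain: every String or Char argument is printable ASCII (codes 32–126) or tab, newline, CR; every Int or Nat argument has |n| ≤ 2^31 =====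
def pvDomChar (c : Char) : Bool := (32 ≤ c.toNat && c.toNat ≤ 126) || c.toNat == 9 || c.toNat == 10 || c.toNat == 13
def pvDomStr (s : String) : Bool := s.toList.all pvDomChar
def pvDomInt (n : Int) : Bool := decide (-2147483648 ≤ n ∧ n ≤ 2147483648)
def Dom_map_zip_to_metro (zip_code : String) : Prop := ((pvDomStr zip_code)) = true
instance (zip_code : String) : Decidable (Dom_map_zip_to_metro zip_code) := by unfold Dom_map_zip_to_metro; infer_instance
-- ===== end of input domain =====

-- B replaces A's per-metro membership scan over 130 prefix strings by a numeric decode of the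
-- 3-char prefix followed by a scan of 23 contiguous (lo, hi, metro) integer ranges (alternative).

-- ===== PORT A =====
-- CASE_SHILLER_METROS as an assoc list metro -> prefix list
def csMetros : List (String × List String) :=
  [("Atlanta", ["300", "301", "302", "303"]),
   ("Boston", ["020", "021", "022", "023", "024"]),
   ("Charlotte", ["280", "281", "282"]),
   ("Chicago", ["600", "601", "602", "603", "604", "605", "606"]),
   ("Cleveland", ["440", "441", "442", "443", "444"]),
   ("Dallas", ["750", "751", "752", "753", "754", "755"]),
   ("Denver", ["800", "801", "802", "803", "804"]),
   ("Detroit", ["480", "481", "482", "483", "484"]),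
   ("Las Vegas", ["889", "890", "891"]),
   ("Los Angeles", ["900", "901", "902", "903", "904", "905", "906", "907", "908", "910", "911", "912", "913", "914", "915", "916", "917", "918"]),
   ("Miami", ["330", "331", "332", "333", "334"]),
   ("Minneapolis", ["550", "551", "553", "554", "555"]),
   ("New York", ["100", "101", "102", "103", "104", "105", "106", "107", "108", "109", "110", "111", "112", "113", "114", "115", "116", "117"]),
   ("Phoenix", ["850", "851", "852", "853"]),
   ("Portland", ["970", "971", "972"]),
   ("San Diego", ["919", "920", "921"]),
   ("San Francisco", ["940", "941", "942", "943", "944", "945", "946", "947", "948", "949", "950", "951"]),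
   ("Seattle", ["980", "981", "982", "983", "984"]),
   ("Tampa", ["335", "336", "337", "338"]),
   ("Washington", ["200", "201", "202", "203", "204", "205", "206", "207", "208", "209", "220", "221"])]

-- the 'for metro, info in CASE_SHILLER_METROS.items(): if prefix in info["prefix"]: return metro' loop
def csScan (ms : List (String × List String)) (p : String) : Option String :=
  match ms with
  | [] => none
  | (metro, prefixes) :: rest => if prefixes.contains p then some metro else csScan rest p

def map_zip_to_metro (zip_code : String) : Option String :=
  if zip_code.toList = [] ∨ zip_code.toList.length < 3 then none
  else csScan csMetros
    (String.ofList (PySem.List.slice (PySem.Chars.zfill zip_code.toList 5) none (some 3)))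

-- ===== PORT B =====
-- METRO_RANGES: ascending contiguous numeric prefix ranges (lo, hi, metro)
def metroRanges : List (Int × Int × String) :=
  [(20, 24, "Boston"),
   (100, 117, "New York"),
   (200, 209, "Washington"),
   (220, 221, "Washington"),
   (280, 282, "Charlotte"),
   (300, 303, "Atlanta"),
   (330, 334, "Miami"),
   (335, 338, "Tampa"),
   (440, 444, "Cleveland"),
   (480, 484, "Detroit"),
   (550, 551, "Minneapolis"),
   (553, 555, "Minneapolis"),
   (600, 606, "Chicago"),
   (750, 755, "Dallas"),
   (800, 804, "Denver"),
   (850, 853, "Phoenix"),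
   (889, 891, "Las Vegas"),
   (900, 908, "Los Angeles"),
   (910, 918, "Los Angeles"),
   (919, 921, "San Diego"),
   (940, 951, "San Francisco"),
   (970, 972, "Portland"),
   (980, 984, "Seattle")]

-- the 'for lo, hi, metro in METRO_RANGES: if lo <= n <= hi: return metro' loop
def rangeScan (rs : List (Int × Int × String)) (n : Int) : Option String :=
  match rs with
  | [] => none
  | (lo, hi, metro) :: rest => if lo ≤ n ∧ n ≤ hi then some metro else rangeScan rest n

-- 'if not prefix.isdigit(): return None' then 'n = int(prefix)' (int() cannot fail once isdigit holds) then the range loop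
def rangeLookup (cs : List Char) : Option String :=
  if PySem.Chars.strIsdigit cs then
    match PySem.Int.ofChars? cs with
    | some n => rangeScan metroRanges n
    | none => none
  else none

def map_zip_to_metro_alt (zip_code : String) : Option String :=
  if zip_code.toList = [] ∨ zip_code.toList.length < 3 then none
  else rangeLookup (PySem.List.slice (PySem.Chars.zfill zip_code.toList 5) none (some 3))

-- ===== PRECONDITION & SPEC =====
def Spec_map_zip_to_metro (zip_code : String) (out : Option String) : Prop := out = map_zip_to_metro_alt zip_code
instance (zip_code : String) (out : Option String) : Decidable (Spec_map_zip_to_metro zip_code out) := by unfold Spec_map_zip_to_metro; infer_instance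

-- ===== CLAIM (what is proved, stated in full; the proofs are below) =====
def Claim_equal_map_zip_to_metro : Prop := ∀ (zip_code : String), Dom_map_zip_to_metro zip_code → Spec_map_zip_to_metro zip_code (map_zip_to_metro zip_code)

-- ===== LEMMAS AND PROOFS =====

-- A's table with every prefix string as its character list (proof-side mirror of csMetros)
def csMetrosL : List (String × List (List Char)) :=
  csMetros.map (fun mi => (mi.1, mi.2.map String.toList))

-- A's scan, re-read on character lists
def csScanL (ms : List (String × List (List Char))) (p : List Char) : Option String :=
  match ms with
  | [] => none
  | (metro, prefixes) :: rest => if prefixes.contains p then some metro else csScanL rest p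

lemma str_eq_list (q : String) (cs : List Char) : (String.ofList cs == q) = (cs == q.toList) := by
  by_cases h : q.toList = cs
  · subst h
    rw [String.ofList_toList]
    simp
  · have h2 : String.ofList cs ≠ q := by
      intro he; rw [← he, String.toList_ofList] at h; exact h rfl
    have e1 : (String.ofList cs == q) = false := beq_eq_false_iff_ne.mpr h2
    have e2 : (cs == q.toList) = false := beq_eq_false_iff_ne.mpr (fun he => h he.symm)
    rw [e1, e2]

lemma contains_ofList (ps : List String) (cs : List Char) :
    ps.contains (String.ofList cs) = (ps.map String.toList).contains cs := by
  induction ps with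
  | nil => rfl
  | cons q qs ih => simp only [List.contains_cons, List.map_cons, ih, str_eq_list]

lemma scan_eq_scanL (ms : List (String × List String)) (cs : List Char) :
    csScan ms (String.ofList cs)
      = csScanL (ms.map (fun mi => (mi.1, mi.2.map String.toList))) cs := by
  induction ms with
  | nil => rfl
  | cons mi rest ih =>
      obtain ⟨m, ps⟩ := mi
      simp only [csScan, csScanL, List.map_cons, contains_ofList, ih]

lemma scan_spec (cs : List Char) :
    csScan csMetros (String.ofList cs) = csScanL csMetrosL cs := by
  unfold csMetrosL
  exact scan_eq_scanL csMetros cs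

-- every prefix in the table is all digit characters
set_option maxRecDepth 40000 in
lemma mem_flat_digits : ∀ l ∈ csMetrosL.flatMap Prod.snd, l.all PySem.Chars.isdigit = true := by
  decide

lemma csScanL_eq_none (ms : List (String × List (List Char))) (p : List Char)
    (h : p ∉ ms.flatMap Prod.snd) : csScanL ms p = none := by
  induction ms with
  | nil => rfl
  | cons mi rest ih =>
      simp only [List.flatMap_cons, List.mem_append] at h
      push Not at h
      obtain ⟨m, ps⟩ := mi
      have h1 : p ∉ ps := h.1
      have hc : ps.contains p = false := by
        rw [← Bool.not_eq_true, List.contains_iff_mem]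
        exact h1
      simp only [csScanL, hc]
      simpa using ih h.2

lemma isdigit_bounds (c : Char) (h : PySem.Chars.isdigit c = true) : 48 ≤ c.toNat ∧ c.toNat ≤ 57 := by
  simp only [PySem.Chars.isdigit, Bool.and_eq_true, decide_eq_true_eq, Char.le_def,
    UInt32.le_iff_toNat_le] at h
  exact h

lemma char_eq_ofNat (c : Char) (h : PySem.Chars.isdigit c = true) :
    c = Char.ofNat (48 + (c.toNat - 48)) := by
  have hb := isdigit_bounds c h
  have he : 48 + (c.toNat - 48) = c.toNat := by omega
  rw [he, Char.ofNat_toNat]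

-- both scans agree on every all-digit 3-char prefix (exhaustive check over the 1000 prefixes)
set_option maxRecDepth 40000 in
set_option maxHeartbeats 2000000 in
lemma digits_main : ∀ da db dc : Fin 10,
    csScanL csMetrosL [Char.ofNat (48 + da.val), Char.ofNat (48 + db.val), Char.ofNat (48 + dc.val)]
      = rangeLookup [Char.ofNat (48 + da.val), Char.ofNat (48 + db.val), Char.ofNat (48 + dc.val)] := by
  decide

lemma core_eq (cs : List Char) (h : cs.length = 3) :
    csScan csMetros (String.ofList cs) = rangeLookup cs := by
  match cs, h with
  | [a, b, c], _ =>
    rw [scan_spec]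
    by_cases hd : PySem.Chars.isdigit a = true ∧ PySem.Chars.isdigit b = true ∧ PySem.Chars.isdigit c = true
    · obtain ⟨ha, hb, hc⟩ := hd
      have ba := isdigit_bounds a ha
      have bb := isdigit_bounds b hb
      have bc := isdigit_bounds c hc
      rw [char_eq_ofNat a ha, char_eq_ofNat b hb, char_eq_ofNat c hc]
      exact digits_main ⟨a.toNat - 48, by omega⟩ ⟨b.toNat - 48, by omega⟩ ⟨c.toNat - 48, by omega⟩
    · -- some character is not a digit: A finds no match and B's isdigit guard fires
      have hfalse : PySem.Chars.strIsdigit [a, b, c] = false := by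
        simp only [PySem.Chars.strIsdigit, List.all_cons, List.all_nil, List.isEmpty_cons]
        rcases not_and_or.mp hd with h1 | h23
        · simp [h1]
        · rcases not_and_or.mp h23 with h2 | h3
          · simp [h2]
          · simp [h3]
      have hA : csScanL csMetrosL [a, b, c] = none := by
        apply csScanL_eq_none
        intro hmem
        have hall := mem_flat_digits _ hmem
        simp only [List.all_cons, List.all_nil, Bool.and_eq_true] at hall
        exact absurd ⟨hall.1, hall.2.1, hall.2.2.1⟩ hd
      rw [hA, rangeLookup, hfalse]
      rfl

-- ===== VERDICT (by name: the statement is the Claim_ definition above) =====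
theorem map_zip_to_metro_spec : Claim_equal_map_zip_to_metro := by
  intro zip_code _
  unfold Spec_map_zip_to_metro map_zip_to_metro map_zip_to_metro_alt
  split_ifs with h
  · rfl
  · apply core_eq
    rw [show (3 : Int) = ((3 : Nat) : Int) from rfl, PySem.List.slice_to_natCast]
    rw [List.length_take, PySem.Chars.length_zfill]
    omega
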